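-- pv_equiv track=rewrite | github.com/coolka1234/Self-Playing-Clobber | src/heuristics.py | mobility_score
-- ===== SOURCE A (Python) =====
-- def mobility_score(board, player):
--     opponent = 'B' if player == 'W' else 'W'
--     def count_moves(p):
--         moves = 0
--         for x in range(len(board)):
--             for y in range(len(board[0])):
--                 if board[x][y] == p:
--                     for dx, dy in [(-1,0), (1,0), (0,-1), (0,1)]:
--                         nx, ny = x + dx, y + dy
--                         if 0 <= nx < len(board) and 0 <= ny < len(board[0]):
--                             if board[nx][ny] == ('B' if p == 'W' else 'W'):
--                                 moves += 1
--         return moves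
--     return count_moves(player) - count_moves(opponent)
-- ===== SOURCE B (Python) =====
-- def mobility_score(board, player):
--     opponent = 'B' if player == 'W' else 'W'
--
--     def neighbours(x, y, target):
--         n = 0
--         for nx, ny in ((x - 1, y), (x + 1, y), (x, y - 1), (x, y + 1)):
--             if 0 <= nx < len(board) and 0 <= ny < len(board[0]) and board[nx][ny] == target:
--                 n += 1
--         return n
--
--     score = 0
--     for x in range(len(board)):
--         for y in range(len(board[0])):
--             cell = board[x][y]
--             if cell == player:
--                 score += neighbours(x, y, 'B' if player == 'W' else 'W')
--             elif cell == opponent: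
--                 score -= neighbours(x, y, 'B' if opponent == 'W' else 'W')
--     return score
-- ===== Notes on version B (the rewrite author's own statement) =====
-- stated objective: simpler
-- what changed: Replaces A's two full board scans (count_moves for each colour, subtracted at the end) with a single pass keeping one signed running score: each cell adds its capture-neighbour count if it holds the player and subtracts it if it holds the opponent.
import Mathlib
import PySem

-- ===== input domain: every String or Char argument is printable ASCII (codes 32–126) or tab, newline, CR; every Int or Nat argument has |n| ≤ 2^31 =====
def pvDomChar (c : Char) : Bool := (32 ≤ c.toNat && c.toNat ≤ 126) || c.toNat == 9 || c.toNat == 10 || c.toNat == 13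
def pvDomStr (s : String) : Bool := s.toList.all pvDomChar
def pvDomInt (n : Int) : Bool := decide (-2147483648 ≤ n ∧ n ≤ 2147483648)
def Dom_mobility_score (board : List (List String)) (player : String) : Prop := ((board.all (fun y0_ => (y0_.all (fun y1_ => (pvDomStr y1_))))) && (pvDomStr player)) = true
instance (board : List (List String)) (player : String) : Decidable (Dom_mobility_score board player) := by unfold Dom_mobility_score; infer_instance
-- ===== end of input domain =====

-- B computes the score in ONE pass over the board with a signed running total,
-- instead of A's two full scans (one per colour); objective: simpler.

-- ===== PORT A =====
-- A's nested helper count_moves(p): two nested index loops, then a loop over the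
-- four neighbour offsets.  board[x][y] is ported as getD (exact under Pre_, which
-- guarantees every read index is in range); len(board[0]) is ported as
-- (board.headD []).length (exact: Python evaluates it only when the outer loop
-- runs, i.e. board ≠ []).
def countMovesA (board : List (List String)) (p : String) : Int :=
  (List.range board.length).foldl (fun moves x =>
    (List.range (board.headD []).length).foldl (fun moves y =>
      if (board.getD x []).getD y "" == p then
        ([((-1 : Int), (0 : Int)), (1, 0), (0, -1), (0, 1)]).foldl (fun moves d =>
          let nx : Int := (x : Int) + d.1
          let ny : Int := (y : Int) + d.2
          if 0 ≤ nx ∧ nx < (board.length : Int) ∧ 0 ≤ ny ∧ ny < ((board.headD []).length : Int) then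
            if (board.getD nx.toNat []).getD ny.toNat "" == (if p == "W" then "B" else "W") then
              moves + 1
            else moves
          else moves) moves
      else moves) moves) 0

def mobility_score (board : List (List String)) (player : String) : Int :=
  countMovesA board player - countMovesA board (if player == "W" then "B" else "W")

-- ===== PORT B =====
-- helper neighbours(x, y, target) of Source B
def neighboursB (board : List (List String)) (x y : Nat) (target : String) : Int :=
  ([((x : Int) - 1, (y : Int)), ((x : Int) + 1, (y : Int)),
    ((x : Int), (y : Int) - 1), ((x : Int), (y : Int) + 1)]).foldl (fun n c =>
    if 0 ≤ c.1 ∧ c.1 < (board.length : Int) ∧ 0 ≤ c.2 ∧ c.2 < ((board.headD []).length : Int) ∧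
        (board.getD c.1.toNat []).getD c.2.toNat "" == target then
      n + 1
    else n) 0

def mobility_score_alt (board : List (List String)) (player : String) : Int :=
  let opponent := if player == "W" then "B" else "W"
  (List.range board.length).foldl (fun score x =>
    (List.range (board.headD []).length).foldl (fun score y =>
      let cell := (board.getD x []).getD y ""
      if cell == player then
        score + neighboursB board x y (if player == "W" then "B" else "W")
      else if cell == opponent then
        score - neighboursB board x y (if opponent == "W" then "B" else "W")
      else score) score) 0

-- ===== PRECONDITION & SPEC =====
-- Pre_ excludes exactly the ragged boards on which Python A raises IndexError:
-- some row shorter than the first row while cells are actually read.  (Both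
-- Pythons raise IndexError there.)
def Pre_mobility_score (board : List (List String)) (player : String) : Prop :=
  ∀ row ∈ board, (board.headD []).length ≤ row.length
instance (board : List (List String)) (player : String) : Decidable (Pre_mobility_score board player) := by
  unfold Pre_mobility_score; infer_instance

def pvWitness_mobility_score : List (List String) × String :=
  ([["B", "W"], ["W", "_"]], "W")

def Spec_mobility_score (board : List (List String)) (player : String) (out : Int) : Prop := out = mobility_score_alt board player
instance (board : List (List String)) (player : String) (out : Int) : Decidable (Spec_mobility_score board player out) := by unfold Spec_mobility_score; infer_instance

-- ===== CLAIM (what is proved, stated in full; the proofs are below) =====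
def Claim_equal_mobility_score : Prop := ∀ (board : List (List String)) (player : String), Dom_mobility_score board player → Pre_mobility_score board player → Spec_mobility_score board player (mobility_score board player)

-- ===== LEMMAS AND PROOFS =====

-- a foldl whose step adds a per-element delta is init + sum of deltas
theorem foldl_delta {α : Type} (f : Int → α → Int) (δ : α → Int)
    (h : ∀ m a, f m a = m + δ a) :
    ∀ (l : List α) (init : Int), l.foldl f init = init + (l.map δ).sum := by
  intro l
  induction l with
  | nil => intro init; simp
  | cons a t ih => intro init; simp only [List.foldl, List.map, List.sum_cons]; rw [ih, h]; ring

theorem foldl_shift {α : Type} (f : Int → α → Int) (h : ∀ m a, f m a = m + f 0 a) :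
    ∀ (l : List α) (init : Int), l.foldl f init = init + l.foldl f 0 := by
  intro l
  induction l with
  | nil => intro init; simp
  | cons a t ih => intro init; simp only [List.foldl]; rw [ih (f init a), ih (f 0 a), h init a]; ring

theorem sum_map_sub {α : Type} (l : List α) (f g : α → Int) :
    (l.map f).sum - (l.map g).sum = (l.map (fun a => f a - g a)).sum := by
  induction l with
  | nil => simp
  | cons a t ih => simp only [List.map, List.sum_cons]; omega

-- A's inner neighbour loop for colour p, started at 0
def innerA (board : List (List String)) (p : String) (x y : Nat) : Int :=
  ([((-1 : Int), (0 : Int)), (1, 0), (0, -1), (0, 1)]).foldl (fun moves d =>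
    let nx : Int := (x : Int) + d.1
    let ny : Int := (y : Int) + d.2
    if 0 ≤ nx ∧ nx < (board.length : Int) ∧ 0 ≤ ny ∧ ny < ((board.headD []).length : Int) then
      if (board.getD nx.toNat []).getD ny.toNat "" == (if p == "W" then "B" else "W") then
        moves + 1
      else moves
    else moves) 0

-- A's per-cell delta for colour p
def deltaA (board : List (List String)) (p : String) (x y : Nat) : Int :=
  if (board.getD x []).getD y "" == p then innerA board p x y else 0

-- B's per-cell delta
def deltaB (board : List (List String)) (player : String) (x y : Nat) : Int :=
  if (board.getD x []).getD y "" == player then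
    neighboursB board x y (if player == "W" then "B" else "W")
  else if (board.getD x []).getD y "" == (if player == "W" then "B" else "W") then
    -neighboursB board x y (if (if player == "W" then "B" else "W") == "W" then "B" else "W")
  else 0

theorem fA_shift (board : List (List String)) (p : String) (x y : Nat) (m : Int) :
    ([((-1 : Int), (0 : Int)), (1, 0), (0, -1), (0, 1)]).foldl (fun moves d =>
      let nx : Int := (x : Int) + d.1
      let ny : Int := (y : Int) + d.2
      if 0 ≤ nx ∧ nx < (board.length : Int) ∧ 0 ≤ ny ∧ ny < ((board.headD []).length : Int) then
        if (board.getD nx.toNat []).getD ny.toNat "" == (if p == "W" then "B" else "W") then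
          moves + 1
        else moves
      else moves) m = m + innerA board p x y := by
  unfold innerA
  exact foldl_shift _ (by intro m d; dsimp only; split_ifs <;> ring) _ m

theorem countMovesA_eq_sum (board : List (List String)) (p : String) :
    countMovesA board p =
      ((List.range board.length).map (fun x =>
        ((List.range (board.headD []).length).map (fun y => deltaA board p x y)).sum)).sum := by
  unfold countMovesA
  rw [foldl_delta _ (fun x =>
      ((List.range (board.headD []).length).map (fun y => deltaA board p x y)).sum)]
  · rw [zero_add]
  · intro m x
    rw [foldl_delta _ (fun y => deltaA board p x y)]
    intro m y
    unfold deltaA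
    by_cases h : (board.getD x []).getD y "" == p
    · rw [if_pos h, if_pos h, fA_shift]
    · rw [if_neg h, if_neg h]; ring

theorem alt_eq_sum (board : List (List String)) (player : String) :
    mobility_score_alt board player =
      ((List.range board.length).map (fun x =>
        ((List.range (board.headD []).length).map (fun y => deltaB board player x y)).sum)).sum := by
  unfold mobility_score_alt
  dsimp only
  rw [foldl_delta _ (fun x =>
      ((List.range (board.headD []).length).map (fun y => deltaB board player x y)).sum)]
  · rw [zero_add]
  · intro m x
    rw [foldl_delta _ (fun y => deltaB board player x y)]
    intro m y
    unfold deltaB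
    by_cases h1 : (board.getD x []).getD y "" == player
    · rw [if_pos h1, if_pos h1]
    · rw [if_neg h1, if_neg h1]
      by_cases h2 : (board.getD x []).getD y "" == (if player == "W" then "B" else "W")
      · rw [if_pos h2, if_pos h2]; ring
      · rw [if_neg h2, if_neg h2]; ring

-- splitting a guarded guarded increment into a single conjunction
theorem if_if_and (c q : Prop) [Decidable c] [Decidable q] (m : Int) :
    (if c then (if q then m + 1 else m) else m) = (if c ∧ q then m + 1 else m) := by
  split_ifs <;> tauto

-- A's neighbour count coincides with B's helper
theorem innerA_eq_neighbours (board : List (List String)) (p : String) (x y : Nat) :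
    innerA board p x y = neighboursB board x y (if p == "W" then "B" else "W") := by
  have h1 : (x : Int) + (-1) = (x : Int) - 1 := by ring
  have h2 : (y : Int) + (-1) = (y : Int) - 1 := by ring
  simp only [innerA, neighboursB, List.foldl_cons, List.foldl_nil, if_if_and, and_assoc,
    add_zero, h1, h2]

theorem delta_cell (board : List (List String)) (player : String) (x y : Nat) :
    deltaA board player x y -
      deltaA board (if player == "W" then "B" else "W") x y = deltaB board player x y := by
  have hne : ¬(player = (if player == "W" then "B" else "W")) := by
    by_cases hw : player == "W"
    · rw [if_pos hw]
      have : player = "W" := by simpa using hw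
      subst this; decide
    · rw [if_neg hw]
      intro hc
      exact hw (by rw [hc]; rfl)
  unfold deltaA deltaB
  by_cases h1 : (board.getD x []).getD y "" == player
  · have h2 : ¬((board.getD x []).getD y "" == (if player == "W" then "B" else "W")) = true := by
      intro hb
      exact hne ((eq_of_beq h1).symm.trans (eq_of_beq hb))
    rw [if_pos h1, if_pos h1, if_neg h2, innerA_eq_neighbours]
    ring
  · rw [if_neg h1, if_neg h1]
    by_cases h2 : (board.getD x []).getD y "" == (if player == "W" then "B" else "W")
    · rw [if_pos h2, if_pos h2, innerA_eq_neighbours]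
      ring
    · rw [if_neg h2, if_neg h2]; ring

-- ===== VERDICT (by name: the statement is the Claim_ definition above) =====
theorem mobility_score_spec : Claim_equal_mobility_score := by
  intro board player _ _
  unfold Spec_mobility_score mobility_score
  rw [countMovesA_eq_sum, countMovesA_eq_sum, alt_eq_sum, sum_map_sub]
  apply congrArg
  apply List.map_congr_left
  intro x _
  rw [sum_map_sub]
  apply congrArg
  apply List.map_congr_left
  intro y _
  exact delta_cell board player x y
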